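-- pv_equiv track=rewrite | github.com/HuyaneMatsu/derp-2048 | derp2.py | _it_con_builder
-- ===== SOURCE A (Python) =====
-- def _it_con_builder(it,start,end):
--     it=iter(it)
--     _next=it.__next__
--     try:
--         v0=_next()
--     except:
--         yield start+end
--         return
--     try:
--         v1=_next()
--         yield start+str(v0)
--     except:
--         yield start+str(v0)+end
--         return
--     while True:
--         try:
--             v0=_next()
--             yield str(v1)
--         except:
--             yield str(v1)+end
--             return
--         try:
--             v1=_next()
--             yield str(v0)
--         except:
--             yield str(v0)+end
--             return
-- ===== SOURCE B (Python) =====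
-- def _it_con_builder(it, start, end):
--     items = [str(x) for x in it]
--     if not items:
--         yield start + end
--         return
--     items[0] = start + items[0]
--     items[-1] = items[-1] + end
--     yield from items
-- ===== Notes on version B (the rewrite author's own statement) =====
-- stated objective: simpler
-- what changed: Replaced the two-variable lookahead ping-pong generator with a materialize-then-tag approach: build the list of str(x), prefix start onto the first element and append end to the last, then yield the list.
import Mathlib
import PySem

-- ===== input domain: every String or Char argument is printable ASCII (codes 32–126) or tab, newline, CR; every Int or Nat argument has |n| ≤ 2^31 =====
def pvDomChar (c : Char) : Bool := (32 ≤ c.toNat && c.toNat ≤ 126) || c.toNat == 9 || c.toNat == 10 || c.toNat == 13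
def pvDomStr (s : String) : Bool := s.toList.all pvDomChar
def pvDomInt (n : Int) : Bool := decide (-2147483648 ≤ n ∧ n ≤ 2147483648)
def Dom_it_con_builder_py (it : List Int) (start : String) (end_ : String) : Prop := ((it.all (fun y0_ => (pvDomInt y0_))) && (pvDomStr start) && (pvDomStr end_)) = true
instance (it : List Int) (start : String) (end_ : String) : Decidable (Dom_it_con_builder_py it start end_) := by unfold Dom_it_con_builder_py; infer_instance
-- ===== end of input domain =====

-- B replaces A's two-variable lookahead generator with: materialize [str(x)], prefix start to the first item and append end to the last (objective: simpler).


-- ===== PORT A =====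
-- Literal port of A's generator: first-element try, second-element try yielding start+v0,
-- then the while-loop ping-ponging v0/v1 (two next-attempts per iteration) as two-at-a-time recursion.
def itConLoopA (end_ : String) (v1 : Int) (rest : List Int) : List String :=
  match rest with
  | [] => [PySem.Int.toStr v1 ++ end_]                 -- first try fails: yield str(v1)+end
  | v0 :: rest' =>                                     -- v0 = _next(); yield str(v1)
    PySem.Int.toStr v1 ::
      (match rest' with
       | [] => [PySem.Int.toStr v0 ++ end_]            -- second try fails: yield str(v0)+end
       | v1' :: rest'' => PySem.Int.toStr v0 :: itConLoopA end_ v1' rest'')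

def it_con_builder_py (it : List Int) (start : String) (end_ : String) : List String :=
  match it with
  | [] => [start ++ end_]
  | [v0] => [start ++ PySem.Int.toStr v0 ++ end_]
  | v0 :: v1 :: rest => (start ++ PySem.Int.toStr v0) :: itConLoopA end_ v1 rest

-- ===== PORT B =====
-- B: items = [str(x) for x in it]; if empty yield start+end; else mutate items[0] and items[-1], yield the list.
def it_con_builder_py_alt (it : List Int) (start : String) (end_ : String) : List String :=
  let items := it.map PySem.Int.toStr
  if items.isEmpty then [start ++ end_]
  else
    let items := items.set 0 (start ++ items.headI)
    let items := items.set (items.length - 1) (items.getLastI ++ end_)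
    items

-- ===== PRECONDITION & SPEC =====
def Spec_it_con_builder_py (it : List Int) (start : String) (end_ : String) (out : List String) : Prop := out = it_con_builder_py_alt it start end_
instance (it : List Int) (start : String) (end_ : String) (out : List String) : Decidable (Spec_it_con_builder_py it start end_ out) := by unfold Spec_it_con_builder_py; infer_instance

-- ===== CLAIM (what is proved, stated in full; the proofs are below) =====
def Claim_equal_it_con_builder_py : Prop := ∀ (it : List Int) (start : String) (end_ : String), Dom_it_con_builder_py it start end_ → Spec_it_con_builder_py it start end_ (it_con_builder_py it start end_)

-- ===== LEMMAS AND PROOFS =====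
-- tagLast e xs: xs with e appended to its last element (identity on []).
def tagLast (e : String) : List String -> List String
  | [] => []
  | [x] => [x ++ e]
  | x :: y :: xs => x :: tagLast e (y :: xs)

theorem itConLoopA_eq_tagLast (end_ : String) (v1 : Int) (rest : List Int) :
    itConLoopA end_ v1 rest = tagLast end_ (PySem.Int.toStr v1 :: rest.map PySem.Int.toStr) := by
  induction v1, rest using itConLoopA.induct with
  | case1 v1 => simp [itConLoopA, tagLast]
  | case2 v1 v0 rest' ih =>
    cases rest' with
    | nil => simp [itConLoopA, tagLast]
    | cons v1' rest'' =>
      simp only at ih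
      simp only [itConLoopA, List.map_cons, tagLast]
      exact congrArg _ (congrArg _ ih)

-- B's two set operations on a nonempty list equal prefixing start and tagging the last with end.
theorem set_last_eq_tagLast (e : String) (xs : List String) (h : xs ≠ []) :
    xs.set (xs.length - 1) (xs.getLastI ++ e) = tagLast e xs := by
  induction xs with
  | nil => simp at h
  | cons x xs ih =>
    cases xs with
    | nil => simp [tagLast, List.getLastI]
    | cons y ys =>
      have hthis := ih (by simp)
      simp only [List.length_cons, Nat.add_sub_cancel] at hthis ⊢
      rw [List.set_cons_succ]
      have hg : (x :: y :: ys).getLastI = (y :: ys).getLastI := by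
        simp [List.getLastI_eq_getLast?_getD, List.getLast?_cons_cons]
      rw [hg, hthis]
      rfl

theorem it_con_builder_main : ∀ (it : List Int) (start end_ : String),
    it_con_builder_py it start end_ = it_con_builder_py_alt it start end_ := by
  intro it start end_
  match it with
  | [] => simp [it_con_builder_py, it_con_builder_py_alt]
  | [v0] =>
    simp [it_con_builder_py, it_con_builder_py_alt, List.getLastI, String.append_assoc]
  | v0 :: v1 :: rest =>
    simp only [it_con_builder_py, it_con_builder_py_alt, List.map_cons, List.isEmpty_cons,
      if_neg (by simp : ¬ false = true)]
    rw [List.set_cons_zero]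
    rw [set_last_eq_tagLast _ _ (by simp)]
    simp only [List.headI]
    rw [itConLoopA_eq_tagLast]
    rfl

-- ===== VERDICT (by name: the statement is the Claim_ definition above) =====
theorem it_con_builder_py_spec : Claim_equal_it_con_builder_py := by
  intro it start end_ _
  unfold Spec_it_con_builder_py
  exact it_con_builder_main it start end_
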